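-- pv_equiv track=rewrite | github.com/KovalevEvgeny/Skoltech-NNLP-2019 | HW4/classifier_best.py | surround_nonalnum_with_spaces
-- ===== SOURCE A (Python) =====
-- def surround_nonalnum_with_spaces(text):
--     cnt_nonalnum = 0
--     for i in range(len(text)):
--         j = i + 2 * cnt_nonalnum
--         if not text[j].isalnum():
--             text = text[:j] + ' ' + text[j] + ' ' + text[(j + 1):]
--             cnt_nonalnum += 1
--     return text
-- ===== SOURCE B (Python) =====
-- def surround_nonalnum_with_spaces(text):
--     table = {ord(c): ' ' + c + ' ' for c in set(text) if not c.isalnum()}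
--     return text.translate(table)
-- ===== Notes on version B (the rewrite author's own statement) =====
-- stated objective: faster
-- what changed: A repeatedly splices a spaced copy of each non-alphanumeric character into the growing string at shifted indices inside an index loop; B builds a translation table over the distinct characters once and lets a single str.translate pass substitute every non-alphanumeric character.
import Mathlib
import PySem

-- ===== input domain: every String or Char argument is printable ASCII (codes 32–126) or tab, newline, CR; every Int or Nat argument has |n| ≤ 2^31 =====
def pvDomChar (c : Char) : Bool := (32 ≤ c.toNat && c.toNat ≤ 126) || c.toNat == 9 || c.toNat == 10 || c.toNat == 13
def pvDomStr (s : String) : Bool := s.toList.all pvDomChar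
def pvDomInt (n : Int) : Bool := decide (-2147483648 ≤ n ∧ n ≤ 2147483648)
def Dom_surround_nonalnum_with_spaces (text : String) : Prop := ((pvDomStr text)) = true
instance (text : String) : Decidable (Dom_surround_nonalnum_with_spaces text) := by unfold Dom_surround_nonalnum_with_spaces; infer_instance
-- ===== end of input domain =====

-- B replaces A's index-shifted splice loop by a translate table built over the
-- distinct characters of the text and applies it in one pass (measured faster).

-- ===== PORT A =====
-- literal port of A: loop over range(len(text)) carrying (text, cnt_nonalnum),
-- splicing ' ' around text[j] where j = i + 2*cnt_nonalnum.
-- (text[j] is always in range in this loop; pyGetD's default is never used.)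
def surround_nonalnum_with_spaces (text : String) : String :=
  let st :=
    (PySem.List.pyRange 0 (PySem.Str.len text) 1).foldl
      (fun (st : List Char × Int) i =>
        let j := i + 2 * st.2
        let c := PySem.List.pyGetD st.1 j ' '
        if !(PySem.Chars.isalnum c) then
          (PySem.List.slice st.1 none (some j) ++ [' ', c, ' '] ++
             PySem.List.slice st.1 (some (j + 1)) none, st.2 + 1)
        else st)
      (text.toList, 0)
  String.ofList st.1

-- ===== PORT B =====
-- literal port of Source B: build the dict {ord(c): ' '+c+' ' for c in set(text) if not c.isalnum()},
-- then text.translate(table), ported by hand as its exact per-character semantics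
-- (each char c becomes table.get(ord(c), c)).
def surround_nonalnum_with_spaces_alt (text : String) : String :=
  let table : PySem.Dict Int (List Char) :=
    (PySem.Set.ofList text.toList).foldl
      (fun d c =>
        if !(PySem.Chars.isalnum c) then d.insert (c.toNat : Int) [' ', c, ' '] else d)
      PySem.Dict.empty
  String.ofList (text.toList.flatMap (fun c => table.getD (c.toNat : Int) [c]))

-- ===== PRECONDITION & SPEC =====
def Spec_surround_nonalnum_with_spaces (text : String) (out : String) : Prop := out = surround_nonalnum_with_spaces_alt text
instance (text : String) (out : String) : Decidable (Spec_surround_nonalnum_with_spaces text out) := by unfold Spec_surround_nonalnum_with_spaces; infer_instance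

-- ===== CLAIM (what is proved, stated in full; the proofs are below) =====
def Claim_equal_surround_nonalnum_with_spaces : Prop := ∀ (text : String), Dom_surround_nonalnum_with_spaces text → Spec_surround_nonalnum_with_spaces text (surround_nonalnum_with_spaces text)

-- ===== LEMMAS AND PROOFS =====

-- the per-character expansion both programs realise
def pvF (c : Char) : List Char :=
  if PySem.Chars.isalnum c then [c] else [' ', c, ' ']

def pvStepA (st : List Char × Int) (i : Int) : List Char × Int :=
  let j := i + 2 * st.2
  let c := PySem.List.pyGetD st.1 j ' '
  if !(PySem.Chars.isalnum c) then
    (PySem.List.slice st.1 none (some j) ++ [' ', c, ' '] ++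
       PySem.List.slice st.1 (some (j + 1)) none, st.2 + 1)
  else st

lemma pvF_length (l : List Char) :
    (l.flatMap pvF).length =
      l.length + 2 * ((l.filter (fun c => !(PySem.Chars.isalnum c))).length) := by
  induction l with
  | nil => simp
  | cons a l ih =>
    by_cases h : PySem.Chars.isalnum a <;> simp [pvF, h, ih] <;> omega

lemma pvA_loop (cs : List Char) (n : Nat) (h : n ≤ cs.length) :
    (PySem.List.pyRange 0 n 1).foldl pvStepA (cs, 0) =
      ((cs.take n).flatMap pvF ++ cs.drop n,
        (((cs.take n).filter (fun c => !(PySem.Chars.isalnum c))).length : Int)) := by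
  induction n with
  | zero => simp [PySem.List.pyRange]
  | succ n ih =>
    have hn : n ≤ cs.length := Nat.le_of_succ_le h
    have hlt : n < cs.length := h
    have hcast : ((n + 1 : Nat) : Int) = (n : Int) + 1 := by push_cast; ring
    rw [hcast, PySem.List.pyRange_one_succ_right (by positivity), List.foldl_append,
      ih hn, List.foldl_cons, List.foldl_nil]
    set E := (cs.take n).flatMap pvF with hE
    have hdrop : cs.drop n = cs[n] :: cs.drop (n + 1) := List.drop_eq_getElem_cons hlt
    have hlenE : E.length = n + 2 * ((cs.take n).filter (fun c => !(PySem.Chars.isalnum c))).length := by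
      rw [hE, pvF_length]; simp [Nat.min_eq_left hn]
    have hj : (n : Int) + 2 * (((cs.take n).filter (fun c => !(PySem.Chars.isalnum c))).length : Int)
        = ((E.length : Nat) : Int) := by rw [hlenE]; push_cast; ring
    have htake : List.take n cs ++ [cs[n]] = List.take (n + 1) cs := by
      rw [List.take_add_one, List.getElem?_eq_getElem hlt]; rfl
    simp only [pvStepA, hj, hdrop]
    have hget : PySem.List.pyGetD (E ++ cs[n] :: cs.drop (n + 1)) ((E.length : Nat) : Int) ' ' = cs[n] := by
      rw [PySem.List.pyGetD_natCast]
      simp [List.getD, List.getElem?_append_right (Nat.le_refl E.length),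
        List.getElem?_eq_getElem hlt]
    rw [hget]
    by_cases hc : PySem.Chars.isalnum cs[n]
    · have h1 : List.flatMap pvF (List.take (n + 1) cs) = E ++ [cs[n]] := by
        rw [← htake, List.flatMap_append]; simp [pvF, hc, hE]
      have h2 : List.filter (fun c => !PySem.Chars.isalnum c) (List.take (n + 1) cs)
          = List.filter (fun c => !PySem.Chars.isalnum c) (List.take n cs) := by
        rw [← htake, List.filter_append]; simp [hc]
      rw [if_neg (by simp [hc]), h1, h2]
      simp
    · have hc' : PySem.Chars.isalnum cs[n] = false := by simpa using hc
      have h1 : List.flatMap pvF (List.take (n + 1) cs) = E ++ [' ', cs[n], ' '] := by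
        rw [← htake, List.flatMap_append]; simp [pvF, hc', hE]
      have h2 : (List.filter (fun c => !PySem.Chars.isalnum c) (List.take (n + 1) cs)).length
          = (List.filter (fun c => !PySem.Chars.isalnum c) (List.take n cs)).length + 1 := by
        rw [← htake, List.filter_append]; simp [hc']
      have hcast1 : ((E.length : Nat) : Int) + 1 = ((E.length + 1 : Nat) : Int) := by push_cast; ring
      have hdrop2 : List.drop (E.length + 1) (E ++ cs[n] :: cs.drop (n + 1)) = cs.drop (n + 1) := by
        rw [show E ++ cs[n] :: cs.drop (n + 1) = (E ++ [cs[n]]) ++ cs.drop (n + 1) by simp,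
          List.drop_left' (by simp)]
      rw [if_pos (by simp [hc']), hcast1, PySem.List.slice_to_natCast,
        PySem.List.slice_from_natCast, List.take_left, hdrop2, h1, h2]
      simp

-- B's table lookup computes pvF on every character of the text
lemma pvB_table (l : List Char) (d0 : PySem.Dict Int (List Char)) (c : Char) :
    PySem.Dict.getD
      (l.foldl (fun d x =>
          if !(PySem.Chars.isalnum x) then d.insert (x.toNat : Int) [' ', x, ' '] else d) d0)
      (c.toNat : Int) [c] =
    if c ∈ l ∧ ¬ PySem.Chars.isalnum c = true then [' ', c, ' ']
    else PySem.Dict.getD d0 (c.toNat : Int) [c] := by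
  induction l generalizing d0 with
  | nil => simp
  | cons a l ih =>
    rw [List.foldl_cons, ih]
    by_cases hmem : c ∈ l ∧ ¬ PySem.Chars.isalnum c = true
    · rw [if_pos hmem, if_pos ⟨List.mem_cons_of_mem a hmem.1, hmem.2⟩]
    · rw [if_neg hmem]
      by_cases ha : PySem.Chars.isalnum a = true
      · rw [if_neg (by simp [ha])]
        rw [if_neg]
        rintro ⟨hmc, hcal⟩
        rcases List.mem_cons.mp hmc with rfl | hcl
        · exact hcal ha
        · exact hmem ⟨hcl, hcal⟩
      · have ha' : PySem.Chars.isalnum a = false := by simpa using ha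
        rw [if_pos (show (!(PySem.Chars.isalnum a)) = true by simp [ha']),
          PySem.Dict.getD_insert]
        by_cases hac : c = a
        · subst hac
          rw [if_pos rfl, if_pos ⟨List.mem_cons_self, by simp [ha']⟩]
        · rw [if_neg (fun hEq => hac (Char.ext (UInt32.toNat_inj.mp (by exact_mod_cast hEq))))]
          rw [if_neg]
          rintro ⟨hmc, hcal⟩
          rcases List.mem_cons.mp hmc with h | hcl
          · exact hac h
          · exact hmem ⟨hcl, hcal⟩

lemma pvB_char (cs : List Char) (c : Char) (hc : c ∈ cs) :
    PySem.Dict.getD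
      ((PySem.Set.ofList cs).foldl (fun d x =>
          if !(PySem.Chars.isalnum x) then d.insert (x.toNat : Int) [' ', x, ' '] else d)
        PySem.Dict.empty)
      (c.toNat : Int) [c] = pvF c := by
  rw [pvB_table]
  by_cases h : PySem.Chars.isalnum c
  · rw [if_neg (by simp [h])]
    simp [pvF, h, PySem.Dict.getD, PySem.Dict.get?, PySem.Dict.empty]
  · rw [if_pos ⟨(PySem.Set.mem_ofList _ _).mpr hc, by simp [h]⟩]
    simp [pvF, h]

lemma pvFlatMap_congr (l : List Char) (f g : Char → List Char)
    (h : ∀ c ∈ l, f c = g c) : l.flatMap f = l.flatMap g := by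
  induction l with
  | nil => rfl
  | cons a l ih =>
    simp only [List.flatMap_cons, h a List.mem_cons_self,
      ih (fun c hc => h c (List.mem_cons_of_mem a hc))]

-- ===== VERDICT (by name: the statement is the Claim_ definition above) =====
theorem surround_nonalnum_with_spaces_spec : Claim_equal_surround_nonalnum_with_spaces := by
  intro text _
  unfold Spec_surround_nonalnum_with_spaces surround_nonalnum_with_spaces surround_nonalnum_with_spaces_alt
  have hA : (PySem.List.pyRange 0 (PySem.Str.len text) 1).foldl pvStepA (text.toList, 0) =
      (text.toList.flatMap pvF,
        ((text.toList.filter (fun c => !(PySem.Chars.isalnum c))).length : Int)) := by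
    have := pvA_loop text.toList text.toList.length (Nat.le_refl _)
    rw [List.take_length, List.drop_length] at this
    simpa [PySem.Str.len] using this
  have hfold : (PySem.List.pyRange 0 (PySem.Str.len text) 1).foldl
      (fun (st : List Char × Int) i =>
        let j := i + 2 * st.2
        let c := PySem.List.pyGetD st.1 j ' '
        if !(PySem.Chars.isalnum c) then
          (PySem.List.slice st.1 none (some j) ++ [' ', c, ' '] ++
             PySem.List.slice st.1 (some (j + 1)) none, st.2 + 1)
        else st) (text.toList, 0) =
      (PySem.List.pyRange 0 (PySem.Str.len text) 1).foldl pvStepA (text.toList, 0) := rfl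
  have hB := pvFlatMap_congr text.toList
    (fun c => PySem.Dict.getD
      ((PySem.Set.ofList text.toList).foldl (fun d x =>
          if !(PySem.Chars.isalnum x) then d.insert (x.toNat : Int) [' ', x, ' '] else d)
        PySem.Dict.empty) (c.toNat : Int) [c])
    pvF (fun c hc => pvB_char text.toList c hc)
  simp only [hfold, hA, hB]
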